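-- pv_equiv track=rewrite | github.com/dataiku/dss-plugin-osisoft | python-lib/osisoft_plugin_common.py | is_child_attribute_path
-- ===== SOURCE A (Python) =====
-- def is_child_attribute_path(path):
--     if not path:
--         return False
--     reversed_path = path[::-1]
--     has_one_pipe = False
--     for char in reversed_path:
--         if char == '|':
--             if has_one_pipe:
--                 return True
--             has_one_pipe = True
--         if char == '\\':
--             return False
--     return False
-- ===== SOURCE B (Python) =====
-- def is_child_attribute_path(path):
--     count = 0
--     for char in path:
--         if char == '\\':
--             count = 0
--         elif char == '|':
--             count += 1
--     return count >= 2
-- ===== Notes on version B (the rewrite author's own statement) =====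
-- stated objective: simpler
-- what changed: Replaces A's reverse-the-string scan with an early-exit boolean flag by a single forward pass keeping a pipe counter that resets at each backslash; no reversal, no guard, no early returns.
import Mathlib
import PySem

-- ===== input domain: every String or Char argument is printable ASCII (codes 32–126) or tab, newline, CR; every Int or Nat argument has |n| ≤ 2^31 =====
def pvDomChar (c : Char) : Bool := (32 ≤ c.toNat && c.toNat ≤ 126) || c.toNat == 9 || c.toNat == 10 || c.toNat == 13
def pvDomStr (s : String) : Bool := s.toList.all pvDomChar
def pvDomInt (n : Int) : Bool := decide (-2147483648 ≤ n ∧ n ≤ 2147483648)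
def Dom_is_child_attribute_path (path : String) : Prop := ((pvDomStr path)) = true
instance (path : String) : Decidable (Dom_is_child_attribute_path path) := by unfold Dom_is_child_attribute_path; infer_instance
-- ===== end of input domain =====

-- B replaces A's reversed scan (boolean flag, early returns) by one forward pass with a
-- pipe counter reset at each backslash; same cost, simpler (objective: simpler).

-- ===== PORT A =====
-- the for-loop over the reversed string, with its early returns, as structural recursion
def pvLoopA : List Char → Bool → Bool
  | [], _ => false
  | c :: rest, has =>
    if c = '|' then
      if has then true
      else if c = '\\' then false else pvLoopA rest true
    else if c = '\\' then false else pvLoopA rest has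

def is_child_attribute_path (path : String) : Bool :=
  if path.toList.isEmpty then false
  else
    match PySem.List.slice? path.toList none none (-1) with  -- path[::-1]
    | some reversed_path => pvLoopA reversed_path false
    | none => false  -- unreachable: step is -1 ≠ 0

-- ===== PORT B =====
def is_child_attribute_path_alt (path : String) : Bool :=
  let count : Int :=
    path.toList.foldl
      (fun count char =>
        if char = '\\' then 0
        else if char = '|' then count + 1
        else count) 0
  decide (2 ≤ count)

-- ===== PRECONDITION & SPEC =====
def Spec_is_child_attribute_path (path : String) (out : Bool) : Prop := out = is_child_attribute_path_alt path
instance (path : String) (out : Bool) : Decidable (Spec_is_child_attribute_path path out) := by unfold Spec_is_child_attribute_path; infer_instance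

-- ===== CLAIM (what is proved, stated in full; the proofs are below) =====
def Claim_equal_is_child_attribute_path : Prop := ∀ (path : String), Dom_is_child_attribute_path path → Spec_is_child_attribute_path path (is_child_attribute_path path)

-- ===== LEMMAS AND PROOFS =====

-- number of pipes in the suffix of l after its last backslash
def pvTailPipes (l : List Char) : Nat :=
  ((l.reverse.takeWhile (fun c => c ≠ '\\')).count '|')

lemma pvLoopA_eq (r : List Char) (has : Bool) :
    pvLoopA r has =
      decide (2 ≤ (r.takeWhile (fun c => c ≠ '\\')).count '|' + (if has then 1 else 0)) := by
  induction r generalizing has with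
  | nil => cases has <;> simp [pvLoopA]
  | cons c rest ih =>
    by_cases hpipe : c = '|'
    · subst hpipe
      cases has
      · simp [pvLoopA, ih]
      · simp [pvLoopA]
    · by_cases hbs : c = '\\'
      · subst hbs
        cases has <;> simp [pvLoopA, hpipe]
      · simp [pvLoopA, hpipe, hbs, ih]

lemma pvLoopB_eq (l : List Char) (cnt : Int) :
    l.foldl
      (fun count char =>
        if char = '\\' then 0
        else if char = '|' then count + 1
        else count) cnt
    = (if '\\' ∈ l then 0 else cnt) + (pvTailPipes l : Int) := by
  induction l using List.reverseRecOn generalizing cnt with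
  | nil => simp [pvTailPipes]
  | append_singleton init c ih =>
    rw [List.foldl_append]
    by_cases hbs : c = '\\'
    · subst hbs
      simp [pvTailPipes]
    · by_cases hpipe : c = '|'
      · subst hpipe
        simp only [List.foldl_cons, List.foldl_nil]
        rw [if_neg (by decide), if_pos trivial, ih]
        simp [pvTailPipes, List.mem_append]
        by_cases hm : '\\' ∈ init <;> simp [hm] <;> omega
      · simp only [List.foldl_cons, List.foldl_nil, if_neg hbs, if_neg hpipe]
        rw [ih]
        have hbs' : ¬ ('\\' = c) := fun h => hbs h.symm
        simp [pvTailPipes, hbs, hpipe, List.mem_append, hbs']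

-- ===== VERDICT (by name: the statement is the Claim_ definition above) =====
theorem is_child_attribute_path_spec : Claim_equal_is_child_attribute_path := by
  intro path _
  unfold Spec_is_child_attribute_path is_child_attribute_path is_child_attribute_path_alt
  rw [PySem.List.slice?_none_none_neg_one]
  simp only [pvLoopB_eq]
  cases h : path.toList with
  | nil => simp [pvTailPipes]
  | cons c rest =>
    simp only [List.isEmpty_cons, Bool.false_eq_true, if_false]
    rw [pvLoopA_eq]
    have : pvTailPipes (c :: rest) = ((c :: rest).reverse.takeWhile (fun c => c ≠ '\\')).count '|' := rfl
    by_cases hm : '\\' ∈ (c :: rest) <;> simp [hm, pvTailPipes]
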